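-- pv_equiv track=rewrite | github.com/Diya-Sajan/100-days-of-code | Basic/Print an array in Pendulum Arrangement/print-an-array-in-pendulum-arrangement.py | pendulumArrangement
-- ===== SOURCE A (Python) =====
-- def pendulumArrangement( arr, n):
--     id
--     ar = []
--     arr = sorted(arr)
--     for i in range(n-1,-1,-1):
--         if i %2 == 0:
--             ar.append(arr[i])
--     for i in range(0, n):
--         if i %2 != 0:
--             ar.append(arr[i])
--
--     return ar
-- ===== SOURCE B (Python) =====
-- def pendulumArrangement(arr, n):
--     s = sorted(arr)
--     if n <= 0:
--         return []
--     left = []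
--     right = []
--     side_right = True
--     for i in range(1, n):
--         if side_right:
--             right.append(s[i])
--         else:
--             left.append(s[i])
--         side_right = not side_right
--     return left[::-1] + [s[0]] + right
-- ===== Notes on version B (the rewrite author's own statement) =====
-- stated objective: alternative
-- what changed: B builds the pendulum center-out in a single left-to-right pass that alternately distributes each sorted element to a right or left pile with a toggling flag, instead of A's two separate even-descending and odd-ascending index passes.
import Mathlib
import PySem

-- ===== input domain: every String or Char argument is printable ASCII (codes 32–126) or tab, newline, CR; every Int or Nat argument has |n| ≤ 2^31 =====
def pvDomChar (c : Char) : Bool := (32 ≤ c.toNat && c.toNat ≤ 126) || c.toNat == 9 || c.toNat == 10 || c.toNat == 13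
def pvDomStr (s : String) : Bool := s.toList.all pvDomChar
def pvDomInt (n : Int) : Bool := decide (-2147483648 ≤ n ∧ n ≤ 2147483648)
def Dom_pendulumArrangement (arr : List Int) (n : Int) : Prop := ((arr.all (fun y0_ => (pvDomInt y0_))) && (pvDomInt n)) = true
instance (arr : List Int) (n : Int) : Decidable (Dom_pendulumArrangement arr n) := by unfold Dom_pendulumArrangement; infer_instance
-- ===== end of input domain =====

-- B replaces A's two even/odd index passes over the sorted list by a single center-out pass
-- that distributes each element to the left or right side with a toggling flag (objective: alternative).

-- ===== PORT A =====
-- arr[i] is ported as pyGetD s i 0; inside Pre_ every index i satisfies 0 ≤ i < s.length,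
-- where Python never raises, so the default is never used.
def pendulumArrangement (arr : List Int) (n : Int) : List Int :=
  let s := PySem.List.sorted arr (fun x => x) false
  let ar := (PySem.List.pyRange (n-1) (-1) (-1)).foldl
      (fun ar i => if PySem.Int.mod i 2 == 0 then ar ++ [PySem.List.pyGetD s i 0] else ar) []
  (PySem.List.pyRange 0 n 1).foldl
      (fun ar i => if PySem.Int.mod i 2 != 0 then ar ++ [PySem.List.pyGetD s i 0] else ar) ar

-- ===== PORT B =====
-- loop body of Source B: send s[i] to the right or left pile and toggle the side flag
def pendStep (s : List Int) (st : List Int × List Int × Bool) (i : Int) :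
    List Int × List Int × Bool :=
  if st.2.2 then (st.1, st.2.1 ++ [PySem.List.pyGetD s i 0], !st.2.2)
  else (st.1 ++ [PySem.List.pyGetD s i 0], st.2.1, !st.2.2)

def pendulumArrangement_alt (arr : List Int) (n : Int) : List Int :=
  let s := PySem.List.sorted arr (fun x => x) false
  if n ≤ 0 then []
  else
    let st := (PySem.List.pyRange 1 n 1).foldl (pendStep s) ([], [], true)
    st.1.reverse ++ [PySem.List.pyGetD s 0 0] ++ st.2.1

-- ===== PRECONDITION & SPEC =====
-- Pre_ excludes exactly the inputs where Python A raises IndexError: n > len(arr).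
def Pre_pendulumArrangement (arr : List Int) (n : Int) : Prop := n ≤ (arr.length : Int)
instance (arr : List Int) (n : Int) : Decidable (Pre_pendulumArrangement arr n) := by
  unfold Pre_pendulumArrangement; infer_instance
def pvWitness_pendulumArrangement : List Int × Int := ([3, 1, 2, 5, 4], 5)

def Spec_pendulumArrangement (arr : List Int) (n : Int) (out : List Int) : Prop := out = pendulumArrangement_alt arr n
instance (arr : List Int) (n : Int) (out : List Int) : Decidable (Spec_pendulumArrangement arr n out) := by unfold Spec_pendulumArrangement; infer_instance

-- ===== CLAIM (what is proved, stated in full; the proofs are below) =====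
def Claim_equal_pendulumArrangement : Prop := ∀ (arr : List Int) (n : Int), Dom_pendulumArrangement arr n → Pre_pendulumArrangement arr n → Spec_pendulumArrangement arr n (pendulumArrangement arr n)

-- ===== LEMMAS AND PROOFS =====

-- parity of consecutive ints toggles
theorem pendParity (a : Int) : decide ((a + 1) % 2 = 1) = !decide (a % 2 = 1) := by
  rcases Int.emod_two_eq_zero_or_one a with h | h <;> simp [Int.add_emod, h]

-- characterisation of B's toggling fold: the left pile collects the even indices in order,
-- the right pile the odd indices, provided the flag starts as the parity of the first index.
theorem pendToggle (s : List Int) (m : Nat) : ∀ (a : Int) (l r : List Int),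
    (PySem.List.pyRange a (a + m) 1).foldl (pendStep s) (l, r, decide (a % 2 = 1)) =
      (l ++ (((PySem.List.pyRange a (a + m) 1)).filter
                (fun i => decide (i % 2 = 0))).map (fun i => PySem.List.pyGetD s i 0),
       r ++ ((PySem.List.pyRange a (a + m) 1).filter
                (fun i => decide (i % 2 = 1))).map (fun i => PySem.List.pyGetD s i 0),
       decide ((a + m) % 2 = 1)) := by
  induction m with
  | zero =>
      intro a l r
      simp [PySem.List.pyRange_one_eq_nil (a := a) (b := a) le_rfl]
  | succ k ih =>
      intro a l r
      rw [PySem.List.pyRange_one_cons (by omega : a < a + (k + 1 : Nat))]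
      rw [List.foldl_cons, List.filter_cons, List.filter_cons]
      have harr : a + 1 + (k : Int) = a + ((k + 1 : Nat) : Int) := by push_cast; ring
      rcases Int.emod_two_eq_zero_or_one a with h | h
      · have hf : decide (a % 2 = 1) = false := by simp [h]
        have hf0 : decide (a % 2 = 0) = true := by simp [h]
        rw [show pendStep s (l, r, decide (a % 2 = 1)) a
              = (l ++ [PySem.List.pyGetD s a 0], r, true) from by simp [pendStep, hf]]
        have hih := ih (a + 1) (l ++ [PySem.List.pyGetD s a 0]) r
        rw [pendParity, hf, Bool.not_false, harr] at hih
        rw [hih, hf, hf0, if_pos rfl, if_neg Bool.false_ne_true]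
        rw [List.map_cons, List.append_assoc, List.singleton_append]
      · have hf : decide (a % 2 = 1) = true := by simp [h]
        have hf0 : decide (a % 2 = 0) = false := by simp [h]
        rw [show pendStep s (l, r, decide (a % 2 = 1)) a
              = (l, r ++ [PySem.List.pyGetD s a 0], false) from by simp [pendStep, hf]]
        have hih := ih (a + 1) l (r ++ [PySem.List.pyGetD s a 0])
        rw [pendParity, hf, Bool.not_true, harr] at hih
        rw [hih, hf, hf0, if_pos rfl, if_neg Bool.false_ne_true]
        rw [List.map_cons, List.append_assoc, List.singleton_append]

-- A's boolean tests agree with the decide-form predicates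
theorem pendEvenTest (n i : Int) (_ : i ∈ PySem.List.pyRange 0 n 1) :
    (PySem.Int.mod i 2 == 0) = decide (i % 2 = 0) := by
  rw [PySem.Int.mod_eq_emod_of_pos (by omega : (0:Int) < 2)]
  rcases Int.emod_two_eq_zero_or_one i with h2 | h2 <;> simp [h2]

theorem pendOddTest (n i : Int) (_ : i ∈ PySem.List.pyRange 0 n 1) :
    (PySem.Int.mod i 2 != 0) = decide (i % 2 = 1) := by
  rw [PySem.Int.mod_eq_emod_of_pos (by omega : (0:Int) < 2)]
  rcases Int.emod_two_eq_zero_or_one i with h2 | h2 <;> simp [h2]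

-- ===== VERDICT (by name: the statement is the Claim_ definition above) =====
theorem pendulumArrangement_spec : Claim_equal_pendulumArrangement := by
  intro arr n _ _
  unfold Spec_pendulumArrangement
  simp only [pendulumArrangement, pendulumArrangement_alt]
  generalize PySem.List.sorted arr (fun x => x) false = s
  by_cases hn : n ≤ 0
  · rw [PySem.List.pyRange_neg_one_eq_nil (by omega : n - 1 ≤ -1),
        PySem.List.pyRange_one_eq_nil (by omega : n ≤ 0)]
    simp [hn]
  · replace hn : 0 < n := by omega
    rw [if_neg (by omega)]
    rw [PySem.List.foldl_append_if (p := fun i => PySem.Int.mod i 2 == 0)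
          (f := fun i => PySem.List.pyGetD s i 0),
        PySem.List.foldl_append_if (p := fun i => PySem.Int.mod i 2 != 0)
          (f := fun i => PySem.List.pyGetD s i 0)]
    rw [PySem.List.pyRange_neg_one_eq_reverse]
    rw [show (-1 : Int) + 1 = 0 from by norm_num, show n - 1 + 1 = n from by ring]
    rw [List.filter_reverse, List.map_reverse]
    rw [List.filter_congr (fun i hi => pendEvenTest n i hi),
        List.filter_congr (fun i hi => pendOddTest n i hi)]
    rw [PySem.List.pyRange_one_cons hn, show (0 : Int) + 1 = 1 from by norm_num]
    have hB := pendToggle s (n - 1).toNat 1 [] []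
    rw [show ((1 : Int) + ((n - 1).toNat : Int)) = n from by omega,
        show (decide ((1 : Int) % 2 = 1)) = true from by decide] at hB
    rw [hB]
    simp
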